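-- pv_equiv track=rewrite | github.com/NattanSilva/kopa-do-mundo | teams/utils.py | get_year_interval
-- ===== SOURCE A (Python) =====
-- def get_year_interval(start: int, end: int) -> int:
--     cup_years = [
--         1930, 1934, 1938, 1950, 1954,
--         1958, 1962, 1966, 1970, 1974,
--         1978, 1982, 1986, 1990, 1994,
--         1998, 2002, 2006, 2010, 2014,
--         2018, 2022
--     ]
--     result = []
--     for value in cup_years:
--         if value >= start and value <= end:
--             result.append(value)
--     return len(result)
-- ===== SOURCE B (Python) =====
-- def get_year_interval(start: int, end: int) -> int:
--     cup_years = [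
--         1930, 1934, 1938, 1950, 1954,
--         1958, 1962, 1966, 1970, 1974,
--         1978, 1982, 1986, 1990, 1994,
--         1998, 2002, 2006, 2010, 2014,
--         2018, 2022
--     ]
--
--     def count_leading(pred):
--         # binary search: number of leading elements of the sorted list satisfying pred
--         lo, hi = 0, len(cup_years)
--         while lo < hi:
--             mid = (lo + hi) // 2
--             if pred(cup_years[mid]):
--                 lo = mid + 1
--             else:
--                 hi = mid
--         return lo
--
--     return max(0, count_leading(lambda y: y <= end) - count_leading(lambda y: y < start))
-- ===== Notes on version B (the rewrite author's own statement) =====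
-- stated objective: alternative
-- what changed: Replaces the linear scan that appends matching years to a list with two binary searches over the sorted constant list (bisect_right(end) - bisect_left(start), clamped at 0).
import Mathlib
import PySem

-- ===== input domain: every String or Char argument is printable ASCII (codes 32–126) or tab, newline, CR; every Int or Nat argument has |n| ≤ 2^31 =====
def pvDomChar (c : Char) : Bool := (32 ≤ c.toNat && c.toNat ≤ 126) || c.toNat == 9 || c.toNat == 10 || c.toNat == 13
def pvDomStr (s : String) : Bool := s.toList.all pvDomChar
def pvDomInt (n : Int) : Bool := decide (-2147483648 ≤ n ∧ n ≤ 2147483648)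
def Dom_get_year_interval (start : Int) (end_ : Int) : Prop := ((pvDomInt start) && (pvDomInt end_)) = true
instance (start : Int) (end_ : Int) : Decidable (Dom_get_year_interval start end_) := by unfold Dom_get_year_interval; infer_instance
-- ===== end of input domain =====

-- B replaces A's linear scan-and-append with two binary searches over the sorted constant list; alternative algorithm, equal results.

-- the constant World Cup years list (same literal in both Pythons)
def pvCupYears : List Int :=
  [1930, 1934, 1938, 1950, 1954,
   1958, 1962, 1966, 1970, 1974,
   1978, 1982, 1986, 1990, 1994,
   1998, 2002, 2006, 2010, 2014,
   2018, 2022]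

-- ===== PORT A =====
def get_year_interval (start : Int) (end_ : Int) : Int :=
  let result : List Int :=
    pvCupYears.foldl (fun acc value => if value ≥ start ∧ value ≤ end_ then acc ++ [value] else acc) []
  (result.length : Int)

-- ===== PORT B =====
-- count_leading in Source B: binary search (while lo < hi) returning the number of leading
-- elements of the sorted list satisfying pred; the while loop is encoded structurally
-- with a fuel argument (fuel ≥ hi - lo always suffices, see pvCountLeading_spec)
def pvCountLeading (a : List Int) (pred : Int → Bool) : Nat → Nat → Nat → Nat
  | 0, lo, _ => lo
  | fuel + 1, lo, hi =>
    if lo < hi then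
      let mid := (lo + hi) / 2
      if pred (a.getD mid 0) then pvCountLeading a pred fuel (mid + 1) hi
      else pvCountLeading a pred fuel lo mid
    else lo

def get_year_interval_alt (start : Int) (end_ : Int) : Int :=
  max 0 ((pvCountLeading pvCupYears (fun y => y ≤ end_) pvCupYears.length 0 pvCupYears.length : Int)
       - (pvCountLeading pvCupYears (fun y => y < start) pvCupYears.length 0 pvCupYears.length : Int))

-- ===== PRECONDITION & SPEC =====
def Spec_get_year_interval (start : Int) (end_ : Int) (out : Int) : Prop := out = get_year_interval_alt start end_
instance (start : Int) (end_ : Int) (out : Int) : Decidable (Spec_get_year_interval start end_ out) := by unfold Spec_get_year_interval; infer_instance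

-- ===== CLAIM (what is proved, stated in full; the proofs are below) =====
def Claim_equal_get_year_interval : Prop := ∀ (start : Int) (end_ : Int), Dom_get_year_interval start end_ → Spec_get_year_interval start end_ (get_year_interval start end_)

-- ===== LEMMAS AND PROOFS =====

-- For a sorted list and a downward-closed predicate, an element satisfies the predicate
-- iff its index is below the count of satisfying elements.
theorem pv_sorted_get_iff (l : List Int) (p : Int → Bool)
    (hs : l.Pairwise (· ≤ ·)) (hmono : ∀ y z : Int, y ≤ z → p z = true → p y = true) :
    ∀ i (h : i < l.length), (p l[i] = true ↔ i < l.countP p) := by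
  induction l with
  | nil => intro i h; simp at h
  | cons a t ih =>
    intro i h
    rcases List.pairwise_cons.mp hs with ⟨hall, hst⟩
    cases i with
    | zero =>
      simp only [List.getElem_cons_zero, List.countP_cons]
      constructor
      · intro hp
        have : 0 < (if p a then 1 else 0) := by simp [hp]
        omega
      · intro hk
        by_contra hpa
        have hpa' : p a = false := by
          cases hpab : p a with
          | true => exact absurd hpab hpa
          | false => rfl
        have h0 : t.countP p = 0 := by
          rw [List.countP_eq_zero]
          intro y hy
          cases hpy : p y with
          | false => simp
          | true =>
            have := hmono a y (hall y hy) hpy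
            rw [this] at hpa'; simp at hpa'
        rw [h0] at hk; simp [hpa'] at hk
    | succ j =>
      simp only [List.getElem_cons_succ, List.countP_cons]
      have hj : j < t.length := by simpa using h
      rw [ih hst j hj]
      cases hpa : p a with
      | true => simp
      | false =>
        have h0 : t.countP p = 0 := by
          rw [List.countP_eq_zero]
          intro y hy
          cases hpy : p y with
          | false => simp
          | true =>
            have := hmono a y (hall y hy) hpy
            rw [this] at hpa; simp at hpa
        simp [h0]

-- binary search returns the count of satisfying elements, for sorted list and
-- downward-closed predicate, whenever the count lies in [lo, hi], hi ≤ length,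
-- and the fuel covers the remaining interval
theorem pvCountLeading_spec (l : List Int) (p : Int → Bool)
    (hs : l.Pairwise (· ≤ ·)) (hmono : ∀ y z : Int, y ≤ z → p z = true → p y = true) :
    ∀ fuel lo hi, hi - lo ≤ fuel → lo ≤ l.countP p → l.countP p ≤ hi → hi ≤ l.length →
      pvCountLeading l p fuel lo hi = l.countP p := by
  intro fuel
  induction fuel with
  | zero =>
    intro lo hi hf h1 h2 h3
    simp only [pvCountLeading]
    omega
  | succ n ih =>
    intro lo hi hf h1 h2 h3
    simp only [pvCountLeading]
    split
    · next hlt =>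
      set mid := (lo + hi) / 2 with hmiddef
      have hmid : mid < l.length := by omega
      have hg : (l.getD mid 0) = l[mid] := by
        rw [List.getD_eq_getElem?_getD, List.getElem?_eq_getElem hmid]; rfl
      rw [hg]
      by_cases hp : p l[mid] = true
      · rw [if_pos hp]
        have := (pv_sorted_get_iff l p hs hmono mid hmid).mp hp
        exact ih (mid + 1) hi (by omega) (by omega) h2 h3
      · rw [if_neg hp]
        have hk : ¬ (mid < l.countP p) := fun hc =>
          hp ((pv_sorted_get_iff l p hs hmono mid hmid).mpr hc)
        exact ih lo mid (by omega) h1 (by omega) (by omega)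
    · next hge => omega

-- pointwise counting identity: the interval count equals the clamped difference of counts
theorem pv_count_diff (l : List Int) (s e : Int) :
    ((l.countP (fun y => decide (s ≤ y ∧ y ≤ e)) : Int)) =
      max 0 ((l.countP (fun y => y ≤ e) : Int) - (l.countP (fun y => y < s) : Int)) := by
  by_cases hse : s ≤ e
  · have key : ∀ m : List Int,
        (m.countP (fun y => decide (s ≤ y ∧ y ≤ e)) : Int) =
          (m.countP (fun y => y ≤ e) : Int) - (m.countP (fun y => y < s) : Int) := by
      intro m
      induction m with
      | nil => simp
      | cons a t ih =>
        simp only [List.countP_cons]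
        push_cast
        rw [ih]
        by_cases h1 : s ≤ a <;> by_cases h2 : a ≤ e <;> by_cases h3 : a < s <;>
          simp [h1, h2, h3] <;> omega
    rw [key l]
    have hle : (l.countP (fun y => y < s) : Int) ≤ (l.countP (fun y => y ≤ e) : Int) := by
      have := List.countP_mono_left (l := l) (p := fun y => decide (y < s))
        (q := fun y => decide (y ≤ e)) (fun y _ hy => by
          simp only [decide_eq_true_eq] at *; omega)
      exact_mod_cast this
    omega
  · have h0 : l.countP (fun y => decide (s ≤ y ∧ y ≤ e)) = 0 := by
      rw [List.countP_eq_zero]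
      intro y _
      simp only [decide_eq_true_eq]
      omega
    have hle : (l.countP (fun y => y ≤ e) : Int) ≤ (l.countP (fun y => y < s) : Int) := by
      have := List.countP_mono_left (l := l) (p := fun y => decide (y ≤ e))
        (q := fun y => decide (y < s)) (fun y _ hy => by
          simp only [decide_eq_true_eq] at *; omega)
      exact_mod_cast this
    rw [h0]
    omega

theorem pvCupYears_sorted : pvCupYears.Pairwise (· ≤ ·) := by decide

-- A's fold computes the interval count
theorem pvA_eq_countP (s e : Int) :
    get_year_interval s e = (pvCupYears.countP (fun y => decide (s ≤ y ∧ y ≤ e)) : Int) := by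
  unfold get_year_interval
  have : pvCupYears.foldl
      (fun acc value => if value ≥ s ∧ value ≤ e then acc ++ [value] else acc) ([] : List Int)
      = [] ++ pvCupYears.filter (fun value => decide (value ≥ s ∧ value ≤ e)) :=
    PySem.List.foldl_append_ite_eq_filter _ _ _
  rw [this]
  simp only [List.nil_append, ← List.countP_eq_length_filter]

-- ===== VERDICT (by name: the statement is the Claim_ definition above) =====
theorem get_year_interval_spec : Claim_equal_get_year_interval := by
  intro s e _
  unfold Spec_get_year_interval
  rw [pvA_eq_countP]
  unfold get_year_interval_alt
  rw [pvCountLeading_spec pvCupYears (fun y => y ≤ e) pvCupYears_sorted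
        (fun y z hyz hz => by simp only [decide_eq_true_eq] at *; omega)
        pvCupYears.length 0 pvCupYears.length (by omega) (Nat.zero_le _) List.countP_le_length (le_refl _),
      pvCountLeading_spec pvCupYears (fun y => y < s) pvCupYears_sorted
        (fun y z hyz hz => by simp only [decide_eq_true_eq] at *; omega)
        pvCupYears.length 0 pvCupYears.length (by omega) (Nat.zero_le _) List.countP_le_length (le_refl _)]
  exact pv_count_diff pvCupYears s e
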